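-- pv_equiv track=rewrite | github.com/wutuobangC/Detection-of-EEG-instability-in-neurological-disorders-using-the-DTM-function | machinelearn.py | PD_combine
-- ===== SOURCE A (Python) =====
-- def PD_combine(data):
--     DTM1 = []
--     DTM2 = []
--     DTM1_average = []
--     DTM2_average = []
--     for i in range(int(len(data) / 4)):
--         DTM1 = DTM1 + data[i]
--         DTM1_average = DTM1_average + data[i + int(len(data) / 4)]
--         DTM2 = DTM2 + data[i + int(len(data) / 2)]
--         DTM2_average = DTM2_average + data[i + int(len(data) / 2) + int(len(data) / 4)]
--     return [DTM1, DTM2, DTM1_average, DTM2_average]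
-- ===== SOURCE B (Python) =====
-- def PD_combine(data):
--     q = len(data) // 4
--     h = len(data) // 2
--     out = [[], [], [], []]
--     for i, row in enumerate(data):
--         if i < q:
--             out[0].extend(row)
--         elif h <= i < h + q:
--             out[1].extend(row)
--         elif i < 2 * q:
--             out[2].extend(row)
--         elif h + q <= i < h + 2 * q:
--             out[3].extend(row)
--     return out
-- ===== Notes on version B (the rewrite author's own statement) =====
-- stated objective: faster
-- what changed: Instead of A's loop over range(len//4) that gathers four rows per iteration by index arithmetic and rebuilds each accumulator list with + (quadratic copying), B makes one pass over enumerate(data), routing each row into one of four in-place output buckets (extend) by interval tests on its index.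
import Mathlib
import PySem

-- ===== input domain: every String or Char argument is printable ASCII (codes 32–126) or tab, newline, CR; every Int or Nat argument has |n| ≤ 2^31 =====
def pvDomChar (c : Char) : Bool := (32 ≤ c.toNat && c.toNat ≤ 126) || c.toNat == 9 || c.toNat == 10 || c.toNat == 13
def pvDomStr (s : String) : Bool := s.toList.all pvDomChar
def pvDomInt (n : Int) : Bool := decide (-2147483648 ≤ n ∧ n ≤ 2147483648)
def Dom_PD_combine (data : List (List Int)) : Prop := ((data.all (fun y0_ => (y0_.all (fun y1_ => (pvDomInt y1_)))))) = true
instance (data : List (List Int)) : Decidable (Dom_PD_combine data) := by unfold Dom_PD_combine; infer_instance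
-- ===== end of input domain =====

-- B replaces A's range(len//4) gather loop (four indexed reads and list-+ rebuilds per
-- iteration) by a single pass over enumerate(data) routing each row into one of four
-- in-place buckets by interval tests on its index (no quadratic list-+ recopying; a timing run measured B faster).
-- B mutates only its own fresh buckets; A mutates nothing: same side effects.
-- ===== PORT A =====
def PD_combine (data : List (List Int)) : List (List Int) :=
  let q : Nat := data.length / 4
  let h : Nat := data.length / 2
  let s := (PySem.List.pyRange 0 (q : Int) 1).foldl
    (fun (s : List Int × List Int × List Int × List Int) i =>
      (s.1 ++ PySem.List.pyGetD data i [],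
       s.2.1 ++ PySem.List.pyGetD data (i + (q : Int)) [],
       s.2.2.1 ++ PySem.List.pyGetD data (i + (h : Int)) [],
       s.2.2.2 ++ PySem.List.pyGetD data (i + (h : Int) + (q : Int)) []))
    ([], [], [], [])
  [s.1, s.2.2.1, s.2.1, s.2.2.2]

-- ===== PORT B =====
def PD_combine_alt (data : List (List Int)) : List (List Int) :=
  let q : Nat := data.length / 4
  let h : Nat := data.length / 2
  let o := (PySem.List.enumerate data 0).foldl
    (fun (o : List Int × List Int × List Int × List Int) p =>
      if p.1 < (q : Int) then (o.1 ++ p.2, o.2.1, o.2.2.1, o.2.2.2)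
      else if (h : Int) ≤ p.1 ∧ p.1 < (h : Int) + (q : Int) then (o.1, o.2.1 ++ p.2, o.2.2.1, o.2.2.2)
      else if p.1 < 2 * (q : Int) then (o.1, o.2.1, o.2.2.1 ++ p.2, o.2.2.2)
      else if (h : Int) + (q : Int) ≤ p.1 ∧ p.1 < (h : Int) + 2 * (q : Int) then (o.1, o.2.1, o.2.2.1, o.2.2.2 ++ p.2)
      else o)
    ([], [], [], [])
  [o.1, o.2.1, o.2.2.1, o.2.2.2]

-- ===== PRECONDITION & SPEC =====
def Spec_PD_combine (data : List (List Int)) (out : List (List Int)) : Prop := out = PD_combine_alt data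
instance (data : List (List Int)) (out : List (List Int)) : Decidable (Spec_PD_combine data out) := by unfold Spec_PD_combine; infer_instance

-- ===== CLAIM (what is proved, stated in full; the proofs are below) =====
def Claim_equal_PD_combine : Prop := ∀ (data : List (List Int)), Dom_PD_combine data → Spec_PD_combine data (PD_combine data)

-- ===== LEMMAS AND PROOFS =====

-- A's 4-tuple fold splits into four independent folds.
theorem pvFoldlProd4 (l : List Int) (g1 g2 g3 g4 : Int → List Int)
    (a b c d : List Int) :
    l.foldl (fun s i => (s.1 ++ g1 i, s.2.1 ++ g2 i, s.2.2.1 ++ g3 i, s.2.2.2 ++ g4 i)) (a, b, c, d)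
      = (l.foldl (fun s i => s ++ g1 i) a, l.foldl (fun s i => s ++ g2 i) b,
         l.foldl (fun s i => s ++ g3 i) c, l.foldl (fun s i => s ++ g4 i) d) := by
  induction l generalizing a b c d with
  | nil => rfl
  | cons x xs ih => simp [List.foldl, ih]

-- Each of A's component folds flattens a contiguous quarter.
theorem pvMain (data : List (List Int)) (off : Nat) (g : Int → Int)
    (hg : ∀ i, g i = i + (off : Int)) :
    ∀ (q : Nat), off + q ≤ data.length →
      (PySem.List.pyRange 0 (q : Int) 1).foldl
        (fun s i => s ++ PySem.List.pyGetD data (g i) []) []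
      = ((data.drop off).take q).flatten := by
  intro q
  induction q with
  | zero => intro _; simp [PySem.List.pyRange]
  | succ n ih =>
    intro hle
    have h1 : ((n : Int) + 1) = ((n + 1 : Nat) : Int) := by push_cast; ring
    have hr : PySem.List.pyRange 0 ((n + 1 : Nat) : Int) 1
        = PySem.List.pyRange 0 (n : Int) 1 ++ [(n : Int)] := by
      rw [← h1, PySem.List.pyRange_one_succ_right]; simp
    have hlt : off + n < data.length := by omega
    have hget : PySem.List.pyGetD data (g (n : Int)) [] = data[off + n] := by
      rw [hg]
      have hc : (n : Int) + (off : Int) = ((off + n : Nat) : Int) := by push_cast; ring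
      rw [hc, PySem.List.pyGetD_natCast, List.getD_eq_getElem _ _ hlt]
    have hdl : n < (data.drop off).length := by simp; omega
    rw [hr, List.foldl_append, ih (by omega)]
    simp only [List.foldl]
    rw [hget, List.take_add_one, List.getElem?_eq_getElem hdl]
    simp [List.getElem_drop]

-- B's routing fold splits into four independent conditional folds
-- (the k-th with the conjunction of its guard and the negations of the earlier guards).
theorem pvSplitRoute (qh : Nat × Nat) (l : List (Int × List Int)) (a b c d : List Int) :
    l.foldl
      (fun (o : List Int × List Int × List Int × List Int) p =>
        if p.1 < (qh.1 : Int) then (o.1 ++ p.2, o.2.1, o.2.2.1, o.2.2.2)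
        else if (qh.2 : Int) ≤ p.1 ∧ p.1 < (qh.2 : Int) + (qh.1 : Int) then (o.1, o.2.1 ++ p.2, o.2.2.1, o.2.2.2)
        else if p.1 < 2 * (qh.1 : Int) then (o.1, o.2.1, o.2.2.1 ++ p.2, o.2.2.2)
        else if (qh.2 : Int) + (qh.1 : Int) ≤ p.1 ∧ p.1 < (qh.2 : Int) + 2 * (qh.1 : Int) then (o.1, o.2.1, o.2.2.1, o.2.2.2 ++ p.2)
        else o) (a, b, c, d)
    = (l.foldl (fun s p => if p.1 < (qh.1 : Int) then s ++ p.2 else s) a,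
       l.foldl (fun s p => if ¬ p.1 < (qh.1 : Int) ∧ ((qh.2 : Int) ≤ p.1 ∧ p.1 < (qh.2 : Int) + (qh.1 : Int)) then s ++ p.2 else s) b,
       l.foldl (fun s p => if ¬ p.1 < (qh.1 : Int) ∧ ¬ ((qh.2 : Int) ≤ p.1 ∧ p.1 < (qh.2 : Int) + (qh.1 : Int)) ∧ p.1 < 2 * (qh.1 : Int) then s ++ p.2 else s) c,
       l.foldl (fun s p => if ¬ p.1 < (qh.1 : Int) ∧ ¬ ((qh.2 : Int) ≤ p.1 ∧ p.1 < (qh.2 : Int) + (qh.1 : Int)) ∧ ¬ p.1 < 2 * (qh.1 : Int) ∧ ((qh.2 : Int) + (qh.1 : Int) ≤ p.1 ∧ p.1 < (qh.2 : Int) + 2 * (qh.1 : Int)) then s ++ p.2 else s) d) := by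
  induction l generalizing a b c d with
  | nil => rfl
  | cons x xs ih =>
    simp only [List.foldl]
    by_cases h0 : x.1 < (qh.1 : Int) <;>
      by_cases h1 : (qh.2 : Int) ≤ x.1 ∧ x.1 < (qh.2 : Int) + (qh.1 : Int) <;>
        by_cases h2 : x.1 < 2 * (qh.1 : Int) <;>
          by_cases h3 : (qh.2 : Int) + (qh.1 : Int) ≤ x.1 ∧ x.1 < (qh.2 : Int) + 2 * (qh.1 : Int) <;>
            simp [h0, h1, h2, h3, ih]

-- A conditional fold over enumerate whose condition is an index interval flattens that segment.
theorem pvSeg (c : Int → Prop) [DecidablePred c] :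
    ∀ (xs : List (List Int)) (lo hi n : Nat) (a : List Int),
      (∀ k : Nat, n ≤ k → (c (k : Int) ↔ (lo ≤ k ∧ k < hi))) → n ≤ lo →
      (PySem.List.enumerate xs (n : Int)).foldl
          (fun s p => if c p.1 then s ++ p.2 else s) a
        = a ++ ((xs.drop (lo - n)).take (hi - lo)).flatten := by
  intro xs
  induction xs with
  | nil => intro lo hi n a _ _; simp [PySem.List.enumerate_nil]
  | cons x xs ih =>
    intro lo hi n a hc hnlo
    rw [PySem.List.enumerate_cons]
    simp only [List.foldl]
    have hcast : (n : Int) + 1 = ((n + 1 : Nat) : Int) := by push_cast; ring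
    by_cases hn : n = lo
    · subst hn
      by_cases hlh : n < hi
      · have hcn : c (n : Int) := (hc n le_rfl).mpr ⟨le_rfl, hlh⟩
        rw [if_pos hcn, hcast,
          ih (n + 1) hi (n + 1) (a ++ x)
            (fun k hk => by
              have := hc k (by omega)
              constructor
              · intro h; exact ⟨by omega, (this.mp h).2⟩
              · intro h; exact this.mpr ⟨by omega, h.2⟩)
            le_rfl]
        have e1 : n + 1 - (n + 1) = 0 := by omega
        have e2 : hi - n = (hi - (n + 1)) + 1 := by omega
        simp [e2, List.take_succ_cons]
      · have hcn : ¬ c (n : Int) := fun h => hlh ((hc n le_rfl).mp h).2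
        rw [if_neg hcn, hcast,
          ih (n + 1) hi (n + 1) a
            (fun k hk => by
              have := hc k (by omega)
              constructor
              · intro h; exact ⟨by omega, (this.mp h).2⟩
              · intro h; omega)
            le_rfl]
        have e1 : hi - (n + 1) = 0 := by omega
        have e2 : hi - n = 0 := by omega
        simp [e1, e2]
    · have hlt : n < lo := by omega
      have hcn : ¬ c (n : Int) := fun h => by
        have := ((hc n le_rfl).mp h).1; omega
      rw [if_neg hcn, hcast,
        ih lo hi (n + 1) a (fun k hk => hc k (by omega)) (by omega)]
      have e : lo - n = (lo - (n + 1)) + 1 := by omega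
      rw [e, List.drop_succ_cons]

-- ===== VERDICT (by name: the statement is the Claim_ definition above) =====
theorem PD_combine_spec : Claim_equal_PD_combine := by
  intro data _
  unfold Spec_PD_combine PD_combine PD_combine_alt
  dsimp only
  set n := data.length with hn
  set q := n / 4 with hq
  set h := n / 2 with hh
  have hb1 : 0 + q ≤ n := by omega
  have hb2 : h + q ≤ n := by omega
  have hb3 : q + q ≤ n := by omega
  have hb4 : (h + q) + q ≤ n := by omega
  have hqh : q ≤ h := by omega
  have h2qh : 2 * q ≤ h := by omega
  rw [pvFoldlProd4]
  rw [pvMain data 0 (fun i => i) (by intro i; simp) q hb1]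
  rw [pvMain data q (fun i => i + (q : Int)) (by intro i; rfl) q hb3]
  rw [pvMain data h (fun i => i + (h : Int)) (by intro i; rfl) q hb2]
  rw [pvMain data (h + q) (fun i => i + (h : Int) + (q : Int))
      (by intro i; push_cast; ring) q hb4]
  rw [pvSplitRoute (q, h)]
  dsimp only
  have S1 := pvSeg (fun i => i < (q : Int)) data 0 q 0 []
      (fun k _ => by constructor <;> (intro hk; push_cast at *; omega)) (by omega)
  have S2 := pvSeg (fun i => ¬ i < (q : Int) ∧ ((h : Int) ≤ i ∧ i < (h : Int) + (q : Int)))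
      data h (h + q) 0 []
      (fun k _ => by constructor <;> (intro hk; push_cast at *; omega)) (by omega)
  have S3 := pvSeg (fun i => ¬ i < (q : Int) ∧ ¬ ((h : Int) ≤ i ∧ i < (h : Int) + (q : Int)) ∧ i < 2 * (q : Int))
      data q (2 * q) 0 []
      (fun k _ => by constructor <;> (intro hk; push_cast at *; omega)) (by omega)
  have S4 := pvSeg (fun i => ¬ i < (q : Int) ∧ ¬ ((h : Int) ≤ i ∧ i < (h : Int) + (q : Int)) ∧ ¬ i < 2 * (q : Int) ∧ ((h : Int) + (q : Int) ≤ i ∧ i < (h : Int) + 2 * (q : Int)))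
      data (h + q) (h + 2 * q) 0 []
      (fun k _ => by constructor <;> (intro hk; push_cast at *; omega)) (by omega)
  have e2 : h + q - h = q := by omega
  have e3 : 2 * q - q = q := by omega
  have e4 : h + 2 * q - (h + q) = q := by omega
  simp only [Nat.cast_zero, Nat.sub_zero, List.drop_zero, List.nil_append, e2, e3, e4] at S1 S2 S3 S4
  rw [S1, S2, S3, S4]
  simp
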